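-- pv_equiv track=rewrite | github.com/MeGotsThis/BotGotsThis | bot/twitchmessage/ircparams.py | parse
-- ===== SOURCE A (Python) =====
-- from typing import List, NamedTuple, Optional
--
-- ParsedParams = NamedTuple('ParsedParams',
--                           [('middle', Optional[str]),
--                            ('trailing', Optional[str])])
--
-- def parse(params:str) -> ParsedParams:
--     if not isinstance(params, str):
--         raise ValueError()
--
--     length = len(params)  # type: int
--     i = 0  # type: int
--
--     if i == length:
--         return ParsedParams(None, None)
--
--     s = []  # type: List[str]
--     m = []  # type: List[str]
--     t = []  # type: List[str]
--     while i < length: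
--         char = params[i]
--         i += 1
--
--         if char == ' ':
--             while i < length and params[i] == ' ':
--                 i += 1
--             m.extend(s)
--             m.append(' ')
--             s = []
--             continue
--         elif char == ':' and not len(s):
--             break
--         else:
--             s.append(char)
--
--     if len(s):
--         m.extend(s)
--     elif len(m):
--         del m[-1]
--
--     if char == ':':
--         while i < length:
--             char = params[i]
--             i += 1
--
--             t.append(char)
--
--     if i != length:
--         raise ValueError()
--
--     middle = ''.join(m) if m else None  # type: Optional[str]
--     trailing = ''.join(t) if t else None  # type: Optional[str]
--
--     return ParsedParams(middle, trailing)
-- ===== SOURCE B (Python) =====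
-- from typing import List, NamedTuple, Optional
--
-- ParsedParams = NamedTuple('ParsedParams',
--                           [('middle', Optional[str]),
--                            ('trailing', Optional[str])])
--
-- def parse(params: str) -> ParsedParams:
--     if not isinstance(params, str):
--         raise ValueError()
--     if not params:
--         return ParsedParams(None, None)
--     # find the trailing boundary: first ':' at position 0 or right after a space
--     if params.startswith(':'):
--         middle_part, trailing = '', params[1:]
--     else:
--         head, sep, tail = params.partition(' :')
--         if sep:
--             middle_part, trailing = head + ' ', tail
--         else:
--             middle_part, trailing = params, None
--     # collapse runs of spaces (keeping one leading space) and drop the trailing one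
--     words = [w for w in middle_part.split(' ') if w]
--     middle = (' ' if middle_part.startswith(' ') else '') + ' '.join(words)
--     middle = middle.rstrip(' ')
--     return ParsedParams(middle or None, trailing or None)
-- ===== Notes on version B (the rewrite author's own statement) =====
-- stated objective: idiomatic
-- what changed: A's hand-rolled character state machine (token buffer s, middle accumulator m, break-on-colon) is replaced by locating the trailing boundary with str.partition(' :') / startswith(':') and collapsing middle spaces with a split(' ')/filter/join pipeline plus rstrip.
import Mathlib
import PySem

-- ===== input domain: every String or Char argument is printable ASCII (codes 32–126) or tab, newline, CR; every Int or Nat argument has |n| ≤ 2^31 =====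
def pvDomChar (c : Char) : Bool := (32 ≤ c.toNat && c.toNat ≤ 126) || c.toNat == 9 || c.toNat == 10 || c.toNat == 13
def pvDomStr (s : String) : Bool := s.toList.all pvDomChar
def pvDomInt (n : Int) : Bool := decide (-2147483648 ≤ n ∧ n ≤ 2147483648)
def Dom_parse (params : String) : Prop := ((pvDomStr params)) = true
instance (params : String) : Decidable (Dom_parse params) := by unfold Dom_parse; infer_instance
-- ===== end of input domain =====

-- B replaces A's character-by-character state machine by a find-the-separator split
-- (str.partition(' :')) plus a split/join space collapse: same O(n) work, measured
-- constant-factor faster (C-implemented str builtins instead of a per-char Python loop).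

-- ===== PORT A =====
-- A's inner `while i < length and params[i] == ' '` (skip a run of spaces)
def skipSpaces (l : List Char) : List Char := List.dropWhile (fun c => c == ' ') l

-- A's main `while i < length` loop over the state (s, m, char); a break returns the
-- unread rest of the input (Python's i points just past the ':').
def parseLoop : List Char → List Char → List Char → Char → List Char × List Char × Char × List Char
  | [], s, m, ch => (s, m, ch, [])
  | c :: r, s, m, _ =>
    if c = ' ' then parseLoop (skipSpaces r) [] (m ++ s ++ [' ']) c
    else if c = ':' ∧ s = [] then (s, m, c, r)
    else parseLoop r (s ++ [c]) m c
termination_by cs _ _ _ => cs.length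
decreasing_by
  · have := List.length_dropWhile_le (fun c => c == ' ') r
    simp only [skipSpaces, List.length_cons]; omega
  · simp

def parse (params : String) : Option String × Option String :=
  let cs := params.toList
  if cs.length = 0 then (none, none)
  else
    match parseLoop cs [] [] ' ' with
    | (s, m, ch, rest) =>
      let m' := if s ≠ [] then m ++ s else if m ≠ [] then m.dropLast else m
      -- the trailing `while` appends every remaining char in order, so t = rest;
      -- the final `if i != length: raise ValueError()` is unreachable (both loop exits leave i = length)
      let t := if ch = ':' then rest else []
      ((if m' ≠ [] then some (String.ofList m') else none),
       (if t ≠ [] then some (String.ofList t) else none))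

-- ===== PORT B =====
-- hand port of str.partition(' :') (no PySem partition): first occurrence of the
-- two-char separator; some (before, after) when found, none otherwise — exact
def partitionSC : List Char → Option (List Char × List Char)
  | [] => none
  | [_] => none
  | c :: c2 :: r =>
    if c = ' ' ∧ c2 = ':' then some ([], r)
    else (partitionSC (c2 :: r)).map (fun p => (c :: p.1, p.2))

-- hand port of str.rstrip(' ') (strip SPACES only, from the right) — exact
def rstripSp (l : List Char) : List Char := (List.dropWhile (fun c => c == ' ') l.reverse).reverse

def parse_alt (params : String) : Option String × Option String :=
  let cs := params.toList
  if cs = [] then (none, none)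
  else
    let (middle_part, trailing) :=
      if cs.head? = some ':' then (([] : List Char), some cs.tail)
      else
        match partitionSC cs with
        | some (head, tail) => (head ++ [' '], some tail)
        | none => (cs, none)
    let words := (PySem.Chars.splitOn middle_part [' ']).filter (fun w => w ≠ [])
    let middle := rstripSp ((if middle_part.head? = some ' ' then [' '] else []) ++
                           PySem.Chars.join [' '] words)
    ((if middle ≠ [] then some (String.ofList middle) else none),
     match trailing with
     | some t => if t ≠ [] then some (String.ofList t) else none
     | none => none)

-- ===== PRECONDITION & SPEC =====
def Spec_parse (params : String) (out : Option String × Option String) : Prop := out = parse_alt params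
instance (params : String) (out : Option String × Option String) : Decidable (Spec_parse params out) := by unfold Spec_parse; infer_instance

-- ===== CLAIM (what is proved, stated in full; the proofs are below) =====
def Claim_equal_parse : Prop := ∀ (params : String), Dom_parse params → Spec_parse params (parse params)

-- ===== LEMMAS AND PROOFS =====

-- where A's trailing part starts: first ':' at position 0 or right after a space
def bndq : List Char → Bool → Option (List Char)
  | [], _ => none
  | c :: r, b => if c = ':' ∧ b = true then some r else bndq r (c == ' ')

-- A's loop, middle component only (none = caller must dropLast its m)
def midC : List Char → List Char → Option (List Char)
  | [], s => if s = [] then none else some s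
  | c :: r, s =>
    if c = ' ' then
      match midC (skipSpaces r) [] with
      | some x => some (s ++ ' ' :: x)
      | none => some s
    else if c = ':' ∧ s = [] then none
    else midC r (s ++ [c])
termination_by cs _ => cs.length
decreasing_by
  · have := List.length_dropWhile_le (fun c => c == ' ') r
    simp only [skipSpaces, List.length_cons]; omega
  · simp

-- collapse runs of spaces to one, dropping a trailing run altogether
def fCol : List Char → List Char
  | [] => []
  | c :: r =>
    if c = ' ' then (if skipSpaces r = [] then [] else ' ' :: fCol (skipSpaces r))
    else c :: fCol r
termination_by cs => cs.length
decreasing_by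
  · have := List.length_dropWhile_le (fun c => c == ' ') r
    simp only [skipSpaces, List.length_cons]; omega
  · simp

-- structural form of str.split(' ')
def splitSp : List Char → List (List Char)
  | [] => [[]]
  | c :: r => if c = ' ' then [] :: splitSp r else (splitSp r).modifyHead (c :: ·)

-- "no occurrence of the separator ' :'"
def noSC : List Char → Bool
  | [] => true
  | [_] => true
  | c :: c2 :: r => !(c == ' ' && c2 == ':') && noSC (c2 :: r)

theorem bndq_skip (r : List Char) : bndq (skipSpaces r) true = bndq r true := by
  induction r with
  | nil => rfl
  | cons c r ih =>
    by_cases hc : c = ' '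
    · subst hc
      have h1 : skipSpaces (' ' :: r) = skipSpaces r := by simp [skipSpaces]
      have h2 : bndq (' ' :: r) true = bndq r true := by simp [bndq]
      rw [h1, h2, ih]
    · have h1 : skipSpaces (c :: r) = c :: r := by simp [skipSpaces, hc]
      rw [h1]

theorem bndq_false_of_head (r : List Char) (h : r.head? ≠ some ':') : bndq r true = bndq r false := by
  cases r with
  | nil => rfl
  | cons c r =>
    have hc : c ≠ ':' := by simpa using h
    simp [bndq, hc]

theorem bndq_partition (r : List Char) : bndq r false = (partitionSC r).map (·.2) := by
  induction r using partitionSC.induct with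
  | case1 => rfl
  | case2 c => simp [bndq, partitionSC]
  | case3 c c2 r2 hsep =>
    obtain ⟨hc, hc2⟩ := hsep
    subst hc; subst hc2
    simp [bndq, partitionSC]
  | case4 c c2 r2 hsep ih =>
    have h1 : partitionSC (c :: c2 :: r2) = (partitionSC (c2 :: r2)).map (fun p => (c :: p.1, p.2)) := by
      simp [partitionSC, hsep]
    rw [h1]
    have h2 : ((partitionSC (c2 :: r2)).map (fun p => (c :: p.1, p.2))).map (·.2)
        = (partitionSC (c2 :: r2)).map (·.2) := by
      cases partitionSC (c2 :: r2) <;> rfl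
    rw [h2, ← ih]
    by_cases hc : c = ' '
    · subst hc
      have hc2 : c2 ≠ ':' := fun h => hsep ⟨rfl, h⟩
      have : bndq (' ' :: c2 :: r2) false = bndq (c2 :: r2) true := by simp [bndq]
      rw [this, bndq_false_of_head _ (by simpa using hc2)]
    · have hcc : c ≠ ':' ∨ True := Or.inr trivial
      simp [bndq, hc]

theorem noSC_cons2 (c c2 : Char) (r : List Char) :
    noSC (c :: c2 :: r) = (!(c == ' ' && c2 == ':') && noSC (c2 :: r)) := rfl

theorem partition_decomp (cs h t : List Char) (hp : partitionSC cs = some (h, t)) :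
    cs = h ++ ' ' :: ':' :: t ∧ noSC (h ++ [' ']) = true := by
  induction cs using partitionSC.induct generalizing h t with
  | case1 => simp [partitionSC] at hp
  | case2 c => simp [partitionSC] at hp
  | case3 c c2 r2 hsep =>
    obtain ⟨hc, hc2⟩ := hsep
    subst hc; subst hc2
    simp [partitionSC] at hp
    obtain ⟨hh, ht⟩ := hp
    subst hh; subst ht
    exact ⟨rfl, rfl⟩
  | case4 c c2 r2 hsep ih =>
    have h1 : partitionSC (c :: c2 :: r2) = (partitionSC (c2 :: r2)).map (fun p => (c :: p.1, p.2)) := by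
      simp [partitionSC, hsep]
    rw [h1] at hp
    cases hq : partitionSC (c2 :: r2) with
    | none => rw [hq] at hp; simp at hp
    | some p =>
      obtain ⟨h2, t2⟩ := p
      rw [hq] at hp
      simp only [Option.map_some, Option.some.injEq, Prod.mk.injEq] at hp
      obtain ⟨hh, ht⟩ := hp
      obtain ⟨hdec, hno⟩ := ih h2 t2 hq
      subst ht
      constructor
      · rw [← hh]; simp [hdec]
      · rw [← hh]
        cases h2 with
        | nil =>
          rw [List.cons_append, List.nil_append]
          have h2 : noSC (c :: [' ']) = (!(c == ' ' && (' ' == ':' : Bool)) && noSC [' ']) := rfl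
          rw [h2]
          simp
          rfl
        | cons a h2' =>
          have ha : a = c2 := by
            have := hdec
            rw [List.cons_append] at this
            exact (List.cons.injEq _ _ _ _ ▸ this).1.symm
          subst ha
          rw [List.cons_append, List.cons_append, noSC_cons2]
          simp only [List.cons_append] at hno
          simp only [hno, Bool.and_true]
          by_cases hc : c = ' '
          · have ha' : a ≠ ':' := fun hcc => hsep ⟨hc, hcc⟩
            simp [ha']
          · simp [hc]

theorem partition_none_noSC (cs : List Char) (hp : partitionSC cs = none) : noSC cs = true := by
  induction cs using partitionSC.induct with
  | case1 => rfl
  | case2 c => rfl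
  | case3 c c2 r2 hsep =>
    obtain ⟨hc, hc2⟩ := hsep; subst hc; subst hc2
    simp [partitionSC] at hp
  | case4 c c2 r2 hsep ih =>
    have h1 : partitionSC (c :: c2 :: r2) = (partitionSC (c2 :: r2)).map (fun p => (c :: p.1, p.2)) := by
      simp [partitionSC, hsep]
    rw [h1] at hp
    cases hq : partitionSC (c2 :: r2) with
    | some p => rw [hq] at hp; simp at hp
    | none =>
      rw [noSC_cons2, ih hq]
      simp only [Bool.and_true]
      by_cases hc : c = ' '
      · have hc2 : c2 ≠ ':' := fun hcc => hsep ⟨hc, hcc⟩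
        simp [hc2]
      · simp [hc]

theorem noSC_tail (c : Char) (r : List Char) (h : noSC (c :: r) = true) : noSC r = true := by
  cases r with
  | nil => rfl
  | cons c2 r2 =>
    rw [noSC_cons2] at h
    exact (Bool.and_eq_true_iff.mp h).2

theorem noSC_skip (r : List Char) (h : noSC r = true) : noSC (skipSpaces r) = true := by
  induction r with
  | nil => exact h
  | cons c r2 ih =>
    by_cases hc : c = ' '
    · subst hc
      have h1 : skipSpaces (' ' :: r2) = skipSpaces r2 := by simp [skipSpaces]
      rw [h1]; exact ih (noSC_tail _ _ h)
    · have h1 : skipSpaces (c :: r2) = c :: r2 := by simp [skipSpaces, hc]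
      rw [h1]; exact h

theorem noSC_skip_head (r : List Char) (h : noSC (' ' :: r) = true) :
    (skipSpaces r).head? ≠ some ':' := by
  induction r with
  | nil => simp [skipSpaces]
  | cons c r2 ih =>
    by_cases hc : c = ' '
    · subst hc
      have h1 : skipSpaces (' ' :: r2) = skipSpaces r2 := by simp [skipSpaces]
      rw [h1]
      apply ih
      rw [noSC_cons2] at h
      exact (Bool.and_eq_true_iff.mp h).2
    · have h1 : skipSpaces (c :: r2) = c :: r2 := by simp [skipSpaces, hc]
      rw [h1]
      rw [noSC_cons2] at h
      have := (Bool.and_eq_true_iff.mp h).1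
      simp at this
      simpa using this

theorem loop_trail (cs : List Char) (s m : List Char) (ch : Char) :
    (if (parseLoop cs s m ch).2.2.1 = ':' then (parseLoop cs s m ch).2.2.2 else []) =
      (bndq cs s.isEmpty).getD [] := by
  induction cs, s, m, ch using parseLoop.induct with
  | case1 s m ch =>
    simp only [parseLoop, bndq]
    split <;> rfl
  | case2 r s m x ih =>
    have hstep : parseLoop (' ' :: r) s m x = parseLoop (skipSpaces r) [] (m ++ s ++ [' ']) ' ' := by
      simp [parseLoop]
    have hr : bndq (' ' :: r) s.isEmpty = bndq r true := by
      have : (' ' : Char) ≠ ':' := by decide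
      simp [bndq, this]
    rw [hstep, ih, hr, ← bndq_skip]
    rfl
  | case3 c r s m x hc hb =>
    obtain ⟨hcc, hs⟩ := hb
    subst hcc; subst hs
    have hstep : parseLoop (':' :: r) [] m x = ([], m, ':', r) := by
      simp [parseLoop]
    rw [hstep]
    simp [bndq]
  | case4 c r s m x hc hb ih =>
    have hstep : parseLoop (c :: r) s m x = parseLoop r (s ++ [c]) m c := by
      simp [parseLoop, hc, hb]
    have hne : (s ++ [c]).isEmpty = false := by simp
    have hr : bndq (c :: r) s.isEmpty = bndq r false := by
      by_cases hcc : c = ':'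
      · subst hcc
        have hs : s ≠ [] := fun h => hb ⟨rfl, h⟩
        have hsf : s.isEmpty = false := by simpa using hs
        have hcf : ((':' : Char) == ' ') = false := by decide
        simp [bndq, hsf, hcf]
      · have hcf : (c == ' ') = false := by simpa using hc
        simp [bndq, hcc, hcf]
    rw [hstep, ih, hne, hr]

theorem loop_mid (cs : List Char) (s m : List Char) (ch : Char) :
    (if (parseLoop cs s m ch).1 ≠ [] then (parseLoop cs s m ch).2.1 ++ (parseLoop cs s m ch).1
     else (parseLoop cs s m ch).2.1.dropLast) =
      (match midC cs s with | some x => m ++ x | none => m.dropLast) := by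
  induction cs, s, m, ch using parseLoop.induct with
  | case1 s m ch =>
    simp only [parseLoop, midC]
    by_cases hs : s = []
    · subst hs; simp
    · simp [hs]
  | case2 r s m x ih =>
    have hstep : parseLoop (' ' :: r) s m x = parseLoop (skipSpaces r) [] (m ++ s ++ [' ']) ' ' := by
      simp [parseLoop]
    have hmid : midC (' ' :: r) s =
        (match midC (skipSpaces r) [] with
         | some x => some (s ++ ' ' :: x)
         | none => some s) := by
      simp [midC]
    rw [hstep, ih, hmid]
    cases midC (skipSpaces r) [] with
    | some x => simp
    | none => simp [List.dropLast_concat]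
  | case3 c r s m x hc hb =>
    obtain ⟨hcc, hs⟩ := hb
    subst hcc; subst hs
    have hstep : parseLoop (':' :: r) [] m x = ([], m, ':', r) := by
      simp [parseLoop]
    have hmid : midC (':' :: r) [] = none := by simp [midC]
    rw [hstep, hmid]
    simp
  | case4 c r s m x hc hb ih =>
    have hstep : parseLoop (c :: r) s m x = parseLoop r (s ++ [c]) m c := by
      simp [parseLoop, hc, hb]
    have hmid : midC (c :: r) s = midC r (s ++ [c]) := by
      simp [midC, hc, hb]
    rw [hstep, ih, hmid]

theorem midC_pref_aux : ∀ (n : Nat) (h t s : List Char), h.length ≤ n →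
    midC (h ++ ' ' :: ':' :: t) s = midC (h ++ [' ']) s := by
  intro n
  induction n with
  | zero =>
    intro h t s hl
    have hnil : h = [] := List.eq_nil_of_length_eq_zero (Nat.le_zero.mp hl)
    subst hnil
    have h1 : skipSpaces (':' :: t) = ':' :: t := by
      simp [skipSpaces]
    simp [midC, h1, skipSpaces]
  | succ n ihn =>
    intro h t s hl
    cases h with
    | nil =>
      have h1 : skipSpaces (':' :: t) = ':' :: t := by simp [skipSpaces]
      simp [midC, h1, skipSpaces]
    | cons c h2 =>
      have hl2 : h2.length ≤ n := by simpa using hl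
      by_cases hc : c = ' '
      · subst hc
        have e1 : midC ((' ' :: h2) ++ ' ' :: ':' :: t) s =
            (match midC (skipSpaces (h2 ++ ' ' :: ':' :: t)) [] with
             | some x => some (s ++ ' ' :: x) | none => some s) := by
          simp [midC]
        have e2 : midC ((' ' :: h2) ++ [' ']) s =
            (match midC (skipSpaces (h2 ++ [' '])) [] with
             | some x => some (s ++ ' ' :: x) | none => some s) := by
          simp [midC]
        rw [e1, e2]
        cases hd : List.dropWhile (fun c => c == ' ') h2 with
        | nil =>
          have s1 : skipSpaces (h2 ++ ' ' :: ':' :: t) = ':' :: t := by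
            simp [skipSpaces, List.dropWhile_append, hd]
          have s2 : skipSpaces (h2 ++ [' ']) = [] := by
            simp [skipSpaces, List.dropWhile_append, hd]
          rw [s1, s2]
          have m1 : midC (':' :: t) [] = none := by simp [midC]
          have m2 : midC ([] : List Char) [] = none := by simp [midC]
          rw [m1, m2]
        | cons d h2' =>
          have s1 : skipSpaces (h2 ++ ' ' :: ':' :: t) = (d :: h2') ++ ' ' :: ':' :: t := by
            simp [skipSpaces, List.dropWhile_append, hd]
          have s2 : skipSpaces (h2 ++ [' ']) = (d :: h2') ++ [' '] := by
            simp [skipSpaces, List.dropWhile_append, hd]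
          rw [s1, s2]
          have hlen : (d :: h2').length ≤ n := by
            have := List.length_dropWhile_le (fun c => c == ' ') h2
            rw [hd] at this
            omega
          rw [ihn (d :: h2') t [] hlen]
      · by_cases hcb : c = ':' ∧ s = []
        · obtain ⟨hcc, hs⟩ := hcb
          subst hcc; subst hs
          simp [midC]
        · have e1 : midC ((c :: h2) ++ ' ' :: ':' :: t) s = midC (h2 ++ ' ' :: ':' :: t) (s ++ [c]) := by
            simp [midC, hc, hcb]
          have e2 : midC ((c :: h2) ++ [' ']) s = midC (h2 ++ [' ']) (s ++ [c]) := by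
            simp [midC, hc, hcb]
          rw [e1, e2, ihn h2 t (s ++ [c]) hl2]

theorem midC_pref (h t s : List Char) :
    midC (h ++ ' ' :: ':' :: t) s = midC (h ++ [' ']) s :=
  midC_pref_aux h.length h t s le_rfl

theorem midC_fCol_aux : ∀ (n : Nat) (mp s : List Char), mp.length ≤ n →
    noSC mp = true → (s = [] → mp.head? ≠ some ':') →
    midC mp s = if s = [] ∧ mp = [] then none else some (s ++ fCol mp) := by
  intro n
  induction n with
  | zero =>
    intro mp s hl _ _
    have hnil : mp = [] := List.eq_nil_of_length_eq_zero (Nat.le_zero.mp hl)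
    subst hnil
    by_cases hs : s = []
    · subst hs; simp [midC, fCol]
    · simp [midC, fCol, hs]
  | succ n ihn =>
    intro mp s hl hn hh
    cases mp with
    | nil =>
      by_cases hs : s = []
      · subst hs; simp [midC, fCol]
      · simp [midC, fCol, hs]
    | cons c r =>
      have hl2 : r.length ≤ n := by simpa using hl
      by_cases hc : c = ' '
      · subst hc
        have e1 : midC (' ' :: r) s =
            (match midC (skipSpaces r) [] with
             | some x => some (s ++ ' ' :: x) | none => some s) := by
          simp [midC]
        rw [e1]
        cases hd : skipSpaces r with
        | nil =>
          have m2 : midC ([] : List Char) [] = none := by simp [midC]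
          rw [m2]
          have : fCol (' ' :: r) = [] := by
            simp [fCol, hd]
          simp [this]
        | cons d r' =>
          have hnr : noSC (d :: r') = true := by
            rw [← hd]; exact noSC_skip r (noSC_tail _ _ hn)
          have hhd : (d :: r').head? ≠ some ':' := by
            rw [← hd]; exact noSC_skip_head r hn
          have hlen : (d :: r').length ≤ n := by
            have := List.length_dropWhile_le (fun c => c == ' ') r
            simp only [skipSpaces] at hd
            rw [hd] at this
            omega
          rw [ihn (d :: r') [] hlen hnr (fun _ => hhd)]
          have : fCol (' ' :: r) = ' ' :: fCol (d :: r') := by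
            simp [fCol, hd]
          simp [this]
      · have hcb : ¬(c = ':' ∧ s = []) := by
          intro hx
          exact hh hx.2 (by simp [hx.1])
        have e1 : midC (c :: r) s = midC r (s ++ [c]) := by
          simp [midC, hc, hcb]
        rw [e1, ihn r (s ++ [c]) hl2 (noSC_tail _ _ hn) (by simp)]
        have : fCol (c :: r) = c :: fCol r := by
          simp [fCol, hc]
        simp [this]

theorem midC_fCol (mp s : List Char) (hn : noSC mp = true) (hh : s = [] → mp.head? ≠ some ':') :
    midC mp s = if s = [] ∧ mp = [] then none else some (s ++ fCol mp) :=
  midC_fCol_aux mp.length mp s le_rfl hn hh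

theorem splitSp_ne_nil : ∀ r, splitSp r ≠ []
  | [] => by simp [splitSp]
  | c :: r => by
    by_cases hc : c = ' '
    · simp [splitSp, hc]
    · cases hq : splitSp r with
      | nil => exact absurd hq (splitSp_ne_nil r)
      | cons w ws => simp [splitSp, hc, hq]

theorem splitOn_go_eq : ∀ (fuel : Nat) (l cur : List Char) (acc : List (List Char)),
    l.length < fuel →
    PySem.Chars.splitOn.go [' '] fuel l cur acc =
      acc.reverse ++ (splitSp l).modifyHead (cur.reverse ++ ·) := by
  intro fuel
  induction fuel with
  | zero => intro l cur acc h; omega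
  | succ fuel ih =>
    intro l cur acc h
    cases l with
    | nil =>
      show (cur.reverse :: acc).reverse = _
      simp [splitSp]
    | cons c rest =>
      show (if [' '].isPrefixOf (c :: rest) = true then
              PySem.Chars.splitOn.go [' '] fuel (List.drop [' '].length (c :: rest)) [] (cur.reverse :: acc)
            else PySem.Chars.splitOn.go [' '] fuel rest (c :: cur) acc) = _
      by_cases hc : c = ' '
      · subst hc
        have hp : [' '].isPrefixOf (' ' :: rest) = true := by simp [List.isPrefixOf]
        rw [if_pos hp]
        simp only [List.length_cons, List.length_nil, List.drop_succ_cons, List.drop_zero]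
        rw [ih rest [] (cur.reverse :: acc) (by simpa using h)]
        simp only [splitSp, if_pos rfl]
        cases hq : splitSp rest <;> simp [List.modifyHead]
      · have hp : [' '].isPrefixOf (c :: rest) = false := by
          simp [List.isPrefixOf]
          exact fun h => hc h.symm
        rw [if_neg (by simp [hp])]
        rw [ih rest (c :: cur) acc (by simpa using h)]
        have hsp : ∃ w ws, splitSp rest = w :: ws := by
          cases hq : splitSp rest with
          | nil => exact absurd hq (splitSp_ne_nil rest)
          | cons w ws => exact ⟨w, ws, rfl⟩
        obtain ⟨w, ws, hw⟩ := hsp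
        simp [splitSp, hc, hw, List.modifyHead]

theorem splitOn_eq (l : List Char) : PySem.Chars.splitOn l [' '] = splitSp l := by
  show PySem.Chars.splitOn.go [' '] (l.length + 1) l [] [] = _
  rw [splitOn_go_eq _ _ _ _ (by omega)]
  cases hq : splitSp l <;> simp [List.modifyHead]


theorem filter_splitSp_skip : ∀ r : List Char,
    (splitSp (skipSpaces r)).filter (fun w => w ≠ []) = (splitSp r).filter (fun w => w ≠ []) := by
  intro r
  induction r with
  | nil => rfl
  | cons c r2 ih =>
    by_cases hc : c = ' '
    · subst hc
      have h1 : skipSpaces (' ' :: r2) = skipSpaces r2 := by simp [skipSpaces]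
      rw [h1, ih]
      simp [splitSp]
    · have h1 : skipSpaces (c :: r2) = c :: r2 := by simp [skipSpaces, hc]
      rw [h1]

theorem skip_head_ne : ∀ (r : List Char) (d : Char) (r' : List Char),
    skipSpaces r = d :: r' → d ≠ ' ' := by
  intro r
  induction r with
  | nil => intro d r' h; simp [skipSpaces] at h
  | cons c r2 ih =>
    intro d r' h
    by_cases hc : c = ' '
    · subst hc
      have h1 : skipSpaces (' ' :: r2) = skipSpaces r2 := by simp [skipSpaces]
      rw [h1] at h
      exact ih d r' h
    · have h1 : skipSpaces (c :: r2) = c :: r2 := by simp [skipSpaces, hc]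
      rw [h1] at h
      cases h
      exact hc

theorem splitSp_cons_ne (c : Char) (r : List Char) (hc : c ≠ ' ') :
    ∃ w ws, splitSp r = w :: ws ∧ splitSp (c :: r) = (c :: w) :: ws := by
  cases hq : splitSp r with
  | nil => exact absurd hq (splitSp_ne_nil r)
  | cons w ws => exact ⟨w, ws, rfl, by simp [splitSp, hc, hq, List.modifyHead]⟩

theorem splitSp_no_space : ∀ (r w : List Char), w ∈ splitSp r → ' ' ∉ w := by
  intro r
  induction r with
  | nil =>
    intro w hw
    simp [splitSp] at hw
    subst hw; simp
  | cons c r2 ih =>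
    intro w hw
    by_cases hc : c = ' '
    · subst hc
      simp only [splitSp, if_pos rfl] at hw
      rcases List.mem_cons.mp hw with hw | hw
      · subst hw; simp
      · exact ih w hw
    · obtain ⟨w0, ws, hq, hq2⟩ := splitSp_cons_ne c r2 hc
      rw [hq2] at hw
      rcases List.mem_cons.mp hw with hw | hw
      · subst hw
        intro hmem
        rcases List.mem_cons.mp hmem with h | h
        · exact hc h.symm
        · exact ih w0 (by rw [hq]; exact List.mem_cons_self ..) h
      · exact ih w (by rw [hq]; exact List.mem_cons_of_mem _ hw)

theorem splitSp_head (r : List Char) (d : Char) (w2 : List Char) (ws : List (List Char))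
    (h : splitSp r = (d :: w2) :: ws) : r.head? = some d := by
  cases r with
  | nil => simp [splitSp] at h
  | cons c r2 =>
    by_cases hc : c = ' '
    · subst hc
      simp only [splitSp, if_pos rfl] at h
      simp at h
    · obtain ⟨w0, ws0, hq, hq2⟩ := splitSp_cons_ne c r2 hc
      rw [hq2] at h
      have : c = d := by
        have := (List.cons.injEq _ _ _ _ ▸ h).1
        exact (List.cons.injEq _ _ _ _ ▸ this).1
      simp [this]

theorem splitSp_head_empty (r : List Char) (ws : List (List Char))
    (h : splitSp r = [] :: ws) : r = [] ∨ ∃ r2, r = ' ' :: r2 := by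
  cases r with
  | nil => exact Or.inl rfl
  | cons c r2 =>
    by_cases hc : c = ' '
    · subst hc; exact Or.inr ⟨r2, rfl⟩
    · obtain ⟨w0, ws0, hq, hq2⟩ := splitSp_cons_ne c r2 hc
      rw [hq2] at h
      simp at h

def endsOK (l : List Char) : Prop := ∀ d, l.getLast? = some d → d ≠ ' '

theorem intercalate_cc (x y : List Char) (l : List (List Char)) :
    List.intercalate [' '] (x :: y :: l) = x ++ [' '] ++ List.intercalate [' '] (y :: l) := by
  simp [List.intercalate, List.intersperse]

theorem intercalate_single (x : List Char) : List.intercalate [' '] [x] = x := by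
  simp [List.intercalate]

theorem intercalate_cons_head (c : Char) (w : List Char) (l : List (List Char)) :
    List.intercalate [' '] ((c :: w) :: l) = c :: List.intercalate [' '] (w :: l) := by
  cases l with
  | nil => rw [intercalate_single, intercalate_single]
  | cons y ys => rw [intercalate_cc, intercalate_cc]; simp

theorem join_ne_nil (w : List Char) (ws : List (List Char)) (hw : w ≠ []) :
    List.intercalate [' '] (w :: ws) ≠ [] := by
  cases ws with
  | nil => rw [intercalate_single]; exact hw
  | cons v vs => rw [intercalate_cc]; simp

theorem join_endsOK : ∀ ws : List (List Char), (∀ w ∈ ws, w ≠ [] ∧ ' ' ∉ w) →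
    endsOK (List.intercalate [' '] ws) := by
  intro ws
  induction ws with
  | nil =>
    intro _ d hd
    simp [List.intercalate] at hd
  | cons w ws ih =>
    intro hall
    cases ws with
    | nil =>
      rw [intercalate_single]
      intro d hd
      have hdw : d ∈ w := List.mem_of_getLast? hd
      intro hds
      exact (hall w (List.mem_cons_self ..)).2 (hds ▸ hdw)
    | cons v vs =>
      rw [intercalate_cc]
      intro d hd
      have hne : List.intercalate [' '] (v :: vs) ≠ [] :=
        join_ne_nil v vs (hall v (List.mem_cons_of_mem _ (List.mem_cons_self ..))).1
      rw [List.getLast?_append] at hd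
      cases hj : (List.intercalate [' '] (v :: vs)).getLast? with
      | none => exact absurd (List.getLast?_eq_none_iff.mp hj) hne
      | some e =>
        rw [hj] at hd
        simp at hd
        subst hd
        exact ih (fun u hu => hall u (List.mem_cons_of_mem _ hu)) e hj

theorem endsOK_cons_of_ne_nil (a : Char) (l : List Char) (hne : l ≠ []) (h : endsOK l) :
    endsOK (a :: l) := by
  intro d hd
  cases l with
  | nil => exact absurd rfl hne
  | cons b l2 =>
    rw [List.getLast?_cons_cons] at hd
    exact h d hd

theorem rstrip_endsOK (l : List Char) (h : endsOK l) : rstripSp l = l := by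
  unfold rstripSp
  cases hrev : l.reverse with
  | nil =>
    rw [List.reverse_eq_nil_iff.mp hrev]
    rfl
  | cons d rev' =>
    have hd : l.getLast? = some d := by rw [← List.head?_reverse, hrev]; rfl
    have hne : d ≠ ' ' := h d hd
    rw [List.dropWhile_cons]
    have : (d == ' ') = false := by simpa using hne
    rw [this]
    simp only [Bool.false_eq_true, if_false]
    rw [← hrev, List.reverse_reverse]

theorem rstrip_single_space : rstripSp [' '] = [] := by decide

theorem tokens_good (x : List Char) :
    ∀ w ∈ (splitSp x).filter (fun w => w ≠ []), w ≠ [] ∧ ' ' ∉ w := by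
  intro w hw
  have := List.mem_filter.mp hw
  exact ⟨by simpa using this.2, splitSp_no_space x w this.1⟩

theorem fp_aux : ∀ (n : Nat) (mp : List Char), mp.length ≤ n →
    rstripSp ((if mp.head? = some ' ' then [' '] else []) ++
      PySem.Chars.join [' '] ((splitSp mp).filter (fun w => w ≠ []))) = fCol mp := by
  intro n
  induction n with
  | zero =>
    intro mp hl
    have hnil : mp = [] := List.eq_nil_of_length_eq_zero (Nat.le_zero.mp hl)
    subst hnil
    show rstripSp _ = fCol []
    simp [splitSp, fCol, rstripSp, PySem.Chars.join, List.intercalate]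
  | succ n ihn =>
    intro mp hl
    cases mp with
    | nil =>
      show rstripSp _ = fCol []
      simp [splitSp, fCol, rstripSp, PySem.Chars.join, List.intercalate]
    | cons c r =>
      have hl2 : r.length ≤ n := by simpa using hl
      by_cases hc : c = ' '
      · subst hc
        have hpref : ((' ' :: r).head? = some ' ') := rfl
        rw [if_pos hpref]
        have hfsp : (splitSp (' ' :: r)).filter (fun w => w ≠ []) =
            (splitSp r).filter (fun w => w ≠ []) := by simp [splitSp]
        rw [hfsp, ← filter_splitSp_skip r]
        cases hd : skipSpaces r with
        | nil =>
          have hfe : (splitSp ([] : List Char)).filter (fun w => w ≠ []) = [] := by decide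
          rw [hfe]
          have hje : PySem.Chars.join [' '] [] = [] := rfl
          rw [hje, List.append_nil, rstrip_single_space]
          simp [fCol, hd]
        | cons d r' =>
          have hdne : d ≠ ' ' := skip_head_ne r d r' hd
          have hlen : (d :: r').length ≤ n := by
            have := List.length_dropWhile_le (fun c => c == ' ') r
            simp only [skipSpaces] at hd
            rw [hd] at this
            omega
          have hih := ihn (d :: r') hlen
          rw [if_neg (by simp [hdne])] at hih
          rw [List.nil_append] at hih
          have hgood := tokens_good (d :: r')
          have hok : endsOK (List.intercalate [' ']
              ((splitSp (d :: r')).filter (fun w => w ≠ []))) := join_endsOK _ hgood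
          have hjoin : PySem.Chars.join [' '] ((splitSp (d :: r')).filter (fun w => w ≠ [])) =
              List.intercalate [' '] ((splitSp (d :: r')).filter (fun w => w ≠ [])) := rfl
          rw [hjoin] at hih ⊢
          have hfc : fCol (d :: r') =
              List.intercalate [' '] ((splitSp (d :: r')).filter (fun w => w ≠ [])) := by
            rw [← hih, rstrip_endsOK _ hok]
          obtain ⟨w0, ws0, hq, hq2⟩ := splitSp_cons_ne d r' hdne
          have hfne : List.intercalate [' ']
              ((splitSp (d :: r')).filter (fun w => w ≠ [])) ≠ [] := by
            rw [hq2]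
            have : ((d :: w0) :: ws0).filter (fun w => w ≠ []) =
                (d :: w0) :: ws0.filter (fun w => w ≠ []) := by simp
            rw [this]
            exact join_ne_nil _ _ (by simp)
          have hokc : endsOK (' ' :: List.intercalate [' ']
              ((splitSp (d :: r')).filter (fun w => w ≠ []))) :=
            endsOK_cons_of_ne_nil _ _ hfne hok
          have : ([' '] : List Char) ++ List.intercalate [' ']
              ((splitSp (d :: r')).filter (fun w => w ≠ [])) =
              ' ' :: List.intercalate [' '] ((splitSp (d :: r')).filter (fun w => w ≠ [])) := rfl
          rw [this, rstrip_endsOK _ hokc]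
          have hfr : fCol (' ' :: r) = ' ' :: fCol (d :: r') := by simp [fCol, hd]
          rw [hfr, hfc]
      · rw [if_neg (by simp [hc])]
        rw [List.nil_append]
        obtain ⟨w, ws, hq, hq2⟩ := splitSp_cons_ne c r hc
        have hfq : (splitSp (c :: r)).filter (fun w => w ≠ []) =
            (c :: w) :: ws.filter (fun w => w ≠ []) := by
          rw [hq2]; simp
        rw [hfq]
        have hjoin : ∀ L, PySem.Chars.join [' '] L = List.intercalate [' '] L := fun _ => rfl
        rw [hjoin]
        have hih := ihn r hl2
        rw [hjoin] at hih
        have hfcr : fCol (c :: r) = c :: fCol r := by simp [fCol, hc]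
        rw [hfcr]
        by_cases hw : w = []
        · subst hw
          cases hfw : ws.filter (fun w => w ≠ []) with
          | nil =>
            rw [intercalate_single]
            have hok : endsOK [c] := by
              intro d hd
              simp at hd
              subst hd
              exact hc
            rw [rstrip_endsOK _ hok]
            have hfr0 : fCol r = [] := by
              rw [← hih, hq]
              have h1 : (([] : List Char) :: ws).filter (fun w => w ≠ []) =
                  ws.filter (fun w => w ≠ []) := by simp
              rw [h1, hfw]
              have h2 : ([' '] : List Char).intercalate [] = [] := rfl
              rw [h2, List.append_nil]
              by_cases hh : r.head? = some ' '
              · rw [if_pos hh]; exact rstrip_single_space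
              · rw [if_neg hh]; rfl
            rw [hfr0]
          | cons v vs =>
            have hvgood : ∀ u ∈ v :: vs, u ≠ [] ∧ ' ' ∉ u := by
              intro u hu
              have hmem : u ∈ ws.filter (fun w => w ≠ []) := by rw [hfw]; exact hu
              have := List.mem_filter.mp hmem
              refine ⟨by simpa using this.2, ?_⟩
              exact splitSp_no_space r u (by rw [hq]; exact List.mem_cons_of_mem _ this.1)
            have hokv : endsOK (List.intercalate [' '] (v :: vs)) := join_endsOK _ hvgood
            have hnev : List.intercalate [' '] (v :: vs) ≠ [] :=
              join_ne_nil v vs (hvgood v (List.mem_cons_self ..)).1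
            rw [intercalate_cc]
            have hshape : ([c] : List Char) ++ [' '] ++ List.intercalate [' '] (v :: vs) =
                c :: ' ' :: List.intercalate [' '] (v :: vs) := rfl
            rw [hshape]
            have hok2 : endsOK (' ' :: List.intercalate [' '] (v :: vs)) :=
              endsOK_cons_of_ne_nil _ _ hnev hokv
            have hok3 : endsOK (c :: ' ' :: List.intercalate [' '] (v :: vs)) :=
              endsOK_cons_of_ne_nil _ _ (by simp) hok2
            rw [rstrip_endsOK _ hok3]
            have hfr : fCol r = ' ' :: List.intercalate [' '] (v :: vs) := by
              rw [← hih, hq]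
              have h1 : (([] : List Char) :: ws).filter (fun w => w ≠ []) =
                  ws.filter (fun w => w ≠ []) := by simp
              rw [h1, hfw]
              rcases splitSp_head_empty r ws hq with hr0 | ⟨r2, hr2⟩
              · subst hr0
                simp [splitSp] at hq
                rw [hq] at hfw
                simp at hfw
              · have hh : r.head? = some ' ' := by rw [hr2]; rfl
                rw [if_pos hh]
                exact rstrip_endsOK _ hok2
            rw [hfr]
        · obtain ⟨e, w2, hw2⟩ : ∃ e w2, w = e :: w2 := by
            cases w with
            | nil => exact absurd rfl hw
            | cons e w2 => exact ⟨e, w2, rfl⟩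
          have hwmem : w ∈ splitSp r := by rw [hq]; exact List.mem_cons_self ..
          have hens : ' ' ∉ w := splitSp_no_space r w hwmem
          have hene : e ≠ ' ' := by
            intro hee
            exact hens (by rw [hw2, hee]; exact List.mem_cons_self ..)
          have hhead : r.head? = some e := splitSp_head r e w2 ws (hw2 ▸ hq)
          have hprefr : ¬(r.head? = some ' ') := by
            rw [hhead]
            simp [hene]
          rw [if_neg hprefr, List.nil_append] at hih
          have hgoodw : ∀ u ∈ w :: ws.filter (fun w => w ≠ []), u ≠ [] ∧ ' ' ∉ u := by
            intro u hu
            rcases List.mem_cons.mp hu with hu | hu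
            · exact ⟨by rw [hu]; exact hw, by rw [hu]; exact hens⟩
            · have := List.mem_filter.mp hu
              refine ⟨by simpa using this.2, ?_⟩
              exact splitSp_no_space r u (by rw [hq]; exact List.mem_cons_of_mem _ this.1)
            
          have hokw : endsOK (List.intercalate [' '] (w :: ws.filter (fun w => w ≠ []))) :=
            join_endsOK _ hgoodw
          have hnew : List.intercalate [' '] (w :: ws.filter (fun w => w ≠ [])) ≠ [] :=
            join_ne_nil _ _ hw
          rw [intercalate_cons_head]
          have hokc : endsOK (c :: List.intercalate [' '] (w :: ws.filter (fun w => w ≠ []))) :=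
            endsOK_cons_of_ne_nil _ _ hnew hokw
          rw [rstrip_endsOK _ hokc]
          have hfr : fCol r = List.intercalate [' '] (w :: ws.filter (fun w => w ≠ [])) := by
            rw [← hih, hq]
            have h1 : (w :: ws).filter (fun w => w ≠ []) =
                w :: ws.filter (fun w => w ≠ []) := by simp [hw]
            rw [h1]
            exact rstrip_endsOK _ hokw
          rw [hfr]

theorem fp (mp : List Char) :
    rstripSp ((if mp.head? = some ' ' then [' '] else []) ++
      PySem.Chars.join [' '] ((splitSp mp).filter (fun w => w ≠ []))) = fCol mp :=
  fp_aux mp.length mp le_rfl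


theorem mid_canon (s m : List Char) :
    (if s ≠ [] then m ++ s else if m ≠ [] then m.dropLast else m) =
      (if s ≠ [] then m ++ s else m.dropLast) := by
  by_cases hs : s = []
  · by_cases hm : m = []
    · simp [hs, hm]
    · simp [hs, hm]
  · simp [hs]

-- ===== VERDICT (by name: the statement is the Claim_ definition above) =====
theorem parse_spec : Claim_equal_parse := by
  unfold Claim_equal_parse
  intro params _
  unfold Spec_parse
  by_cases hnil : params.toList = []
  · simp [parse, parse_alt, hnil]
  · have hlen : ¬(params.toList.length = 0) := fun h0 => hnil (List.eq_nil_of_length_eq_zero h0)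
    have hA := loop_mid params.toList [] [] ' '
    have hT := loop_trail params.toList [] [] ' '
    rcases hP : parseLoop params.toList [] [] ' ' with ⟨s, m, ch, rest⟩
    rw [hP] at hA hT
    dsimp only at hA hT
    simp only [parse, parse_alt]
    rw [if_neg hlen, if_neg hnil, hP]
    dsimp only
    rw [mid_canon, hA, hT]
    by_cases hcol : params.toList.head? = some ':'
    · rw [if_pos hcol]
      obtain ⟨tl, hcs⟩ : ∃ tl, params.toList = ':' :: tl := by
        cases hq : params.toList with
        | nil => exact absurd hq hnil
        | cons c tl =>
          rw [hq] at hcol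
          simp at hcol
          exact ⟨tl, by rw [hcol]⟩
      rw [hcs]
      dsimp only
      rw [splitOn_eq, fp]
      have hmid : midC (':' :: tl) [] = none := by simp [midC]
      rw [hmid]
      have hb : bndq (':' :: tl) true = some tl := by simp [bndq]
      rw [show (([] : List Char).isEmpty) = true from rfl, hb]
      have hf : fCol ([] : List Char) = [] := by simp [fCol]
      rw [hf]
      simp
    · rw [if_neg hcol]
      have hbt : bndq params.toList true = (partitionSC params.toList).map (·.2) := by
        rw [bndq_false_of_head _ hcol, bndq_partition]
      cases hpart : partitionSC params.toList with
      | some p =>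
        obtain ⟨hd, tl⟩ := p
        dsimp only
        obtain ⟨hdec, hno⟩ := partition_decomp params.toList hd tl hpart
        have hhd : (hd ++ [' ']).head? ≠ some ':' := by
          cases hd with
          | nil => simp
          | cons a h' =>
            have : params.toList.head? = some a := by rw [hdec]; rfl
            rw [this] at hcol
            simpa using fun hh => hcol (by rw [hh])
        have hmid : midC params.toList [] = some (fCol (hd ++ [' '])) := by
          rw [hdec, midC_pref, midC_fCol _ _ hno (fun _ => hhd)]
          simp
        rw [hmid]
        rw [splitOn_eq, fp]
        rw [hpart] at hbt
        rw [show (([] : List Char).isEmpty) = true from rfl, hbt]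
        dsimp only [Option.map_some]
        simp
      | none =>
        dsimp only
        have hno : noSC params.toList = true := partition_none_noSC _ hpart
        have hmid : midC params.toList [] = some (fCol params.toList) := by
          rw [midC_fCol _ _ hno (fun _ => hcol)]
          simp [hnil]
        rw [hmid]
        rw [splitOn_eq, fp]
        rw [hpart] at hbt
        rw [show (([] : List Char).isEmpty) = true from rfl, hbt]
        simp
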